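-- pv_equiv track=rewrite | github.com/leeminHong1990/PaoDeKuai | kbengine/assets/scripts/common/utility.py | makeKeyCardSerialTriple
-- ===== SOURCE A (Python) =====
-- import copy
--
-- def getCard2NumDict(cards):
--     card2NumDict = {}
--     for t in cards:
--         if t not in card2NumDict:
--             card2NumDict[t] = 1
--         else:
--             card2NumDict[t] += 1
--     return card2NumDict
--
-- def makeKeyCardSerialTriple(originCardsButKey, originKeys):  # 癞子转化为新的飞机不带
--     makeCards = copy.deepcopy(originCardsButKey)
--     shiftCards = rightShiftCards(originCardsButKey)
--     shiftCards = sorted(shiftCards)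
--     pairNum = int((len(shiftCards) + len(originKeys)) / 3)
--
--     card2NumDict = getCard2NumDict(shiftCards)
--     min_card = shiftCards[0]
--     max_card = shiftCards[len(shiftCards) - 1]
--     if min_card > (14 - pairNum + 1) and max_card <= 14:
--         min_card = 14 - pairNum + 1
--     for j in range(pairNum):
--         tempList = []
--         if (min_card + j) in card2NumDict.keys():
--             if card2NumDict[min_card + j] == 1:
--                 tempList.append((min_card + j) << 3)
--                 tempList.append((min_card + j) << 3)
--             elif card2NumDict[min_card + j] == 2:
--                 tempList.append((min_card + j) << 3)
--         else:
--             tempList.append((min_card + j) << 3)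
--             tempList.append((min_card + j) << 3)
--             tempList.append((min_card + j) << 3)
--         makeCards.extend(tempList)
--
--     makeCards = sorted(makeCards)
--     return makeCards
--
-- def rightShiftCards(cards):
--     result = [0] * len(cards)
--     for i in range(len(cards)):
--         result[i] = cards[i] >> 3
--     return result
-- ===== SOURCE B (Python) =====
-- import copy
--
-- def makeKeyCardSerialTriple(originCardsButKey, originKeys):
--     makeCards = copy.deepcopy(originCardsButKey)
--     shiftCards = sorted(card >> 3 for card in originCardsButKey)
--     pairNum = (len(shiftCards) + len(originKeys)) // 3
--     min_card = shiftCards[0]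
--     max_card = shiftCards[-1]
--     if min_card > (14 - pairNum + 1) and max_card <= 14:
--         min_card = 14 - pairNum + 1
--     # single merge-style pass over the sorted shifted cards: no hash table,
--     # a pointer walks the runs of equal values while the targets increase by 1
--     p = 0
--     n = len(shiftCards)
--     for j in range(pairNum):
--         target = min_card + j
--         count = 0
--         while p < n and shiftCards[p] == target:
--             p += 1
--             count += 1
--         makeCards.extend([target << 3] * max(0, 3 - count))
--     return sorted(makeCards)
-- ===== Notes on version B (the rewrite author's own statement) =====
-- stated objective: alternative
-- what changed: Replaces the getCard2NumDict hash table and its per-target lookups with a single merge-style pointer pass over the sorted shifted cards: for each consecutive target the pointer consumes the run of equal values and pads 3-min(count,3) copies.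
import Mathlib
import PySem

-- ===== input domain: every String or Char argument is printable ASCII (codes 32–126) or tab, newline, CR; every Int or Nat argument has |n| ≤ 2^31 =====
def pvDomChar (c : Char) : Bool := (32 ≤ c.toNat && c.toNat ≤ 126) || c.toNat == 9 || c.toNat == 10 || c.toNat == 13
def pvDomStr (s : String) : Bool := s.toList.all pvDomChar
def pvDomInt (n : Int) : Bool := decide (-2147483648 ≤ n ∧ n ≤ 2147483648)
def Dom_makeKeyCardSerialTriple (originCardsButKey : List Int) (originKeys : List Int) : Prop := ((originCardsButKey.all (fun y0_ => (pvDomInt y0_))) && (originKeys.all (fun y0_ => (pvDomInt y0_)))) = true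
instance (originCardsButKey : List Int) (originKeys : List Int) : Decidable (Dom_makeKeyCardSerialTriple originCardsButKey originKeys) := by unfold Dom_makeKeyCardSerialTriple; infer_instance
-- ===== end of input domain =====

-- B replaces A's hash-table counting (getCard2NumDict) by one merge-style pointer
-- pass over the sorted shifted cards; same return value on every nonempty input.

-- ===== PORT A =====
-- dict-building loop of getCard2NumDict, step for step ('t not in d' / 'd[t] = 1' / 'd[t] += 1')
def getCard2NumDict (cards : List Int) : PySem.Dict Int Int :=
  cards.foldl
    (fun d t => if d.contains t then d.modify t 0 (· + 1) else d.insert t 1)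
    PySem.Dict.empty

-- result[i] = cards[i] >> 3 for each index, i.e. an element-wise map
def rightShiftCards (cards : List Int) : List Int :=
  cards.map (fun (c : Int) => c >>> (3 : Nat))

def makeKeyCardSerialTriple (originCardsButKey : List Int) (originKeys : List Int) : List Int :=
  let makeCards := originCardsButKey
  let shiftCards := rightShiftCards originCardsButKey
  let shiftCards := PySem.List.sorted shiftCards (fun x => x) false
  -- int((a+b)/3): exact floor for the nonnegative lengths that occur
  let pairNum : Int := PySem.Int.floordiv ((shiftCards.length : Int) + (originKeys.length : Int)) 3
  let card2NumDict := getCard2NumDict shiftCards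
  -- shiftCards[0] / shiftCards[len-1]: in range under Pre_ (nonempty list)
  let min_card := PySem.List.pyGetD shiftCards 0 0
  let max_card := PySem.List.pyGetD shiftCards ((shiftCards.length : Int) - 1) 0
  let min_card := if min_card > (14 - pairNum + 1) ∧ max_card ≤ 14 then 14 - pairNum + 1 else min_card
  let makeCards :=
    (PySem.List.pyRange 0 pairNum 1).foldl
      (fun mc j =>
        let tempList : List Int :=
          if card2NumDict.contains (min_card + j) then
            -- card2NumDict[min_card+j]: key present, so getD _ 0 is exact
            if card2NumDict.getD (min_card + j) 0 = 1 then
              [(min_card + j) <<< (3 : Nat), (min_card + j) <<< (3 : Nat)]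
            else if card2NumDict.getD (min_card + j) 0 = 2 then
              [(min_card + j) <<< (3 : Nat)]
            else []
          else
            [(min_card + j) <<< (3 : Nat), (min_card + j) <<< (3 : Nat), (min_card + j) <<< (3 : Nat)]
        mc ++ tempList)
      makeCards
  PySem.List.sorted makeCards (fun x => x) false

-- ===== PORT B =====
-- the inner while loop: consume the run of entries equal to target, returning (count, rest)
def altRun (target : Int) : List Int → Int × List Int
  | [] => (0, [])
  | x :: xs =>
      if x = target then
        let (c, r) := altRun target xs
        (c + 1, r)
      else (0, x :: xs)

-- the 'for j in range(pairNum)' loop with the pointer state (carried as the remaining suffix)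
def altLoop (fuel : Nat) (target : Int) (rest : List Int) (makeCards : List Int) : List Int :=
  match fuel with
  | 0 => makeCards
  | n + 1 =>
      let (count, rest') := altRun target rest
      altLoop n (target + 1) rest'
        (makeCards ++ PySem.List.pyRepeat [target <<< (3 : Nat)] (max 0 (3 - count)))

def makeKeyCardSerialTriple_alt (originCardsButKey : List Int) (originKeys : List Int) : List Int :=
  let makeCards := originCardsButKey
  let shiftCards := PySem.List.sorted (originCardsButKey.map (fun (c : Int) => c >>> (3 : Nat))) (fun x => x) false
  let pairNum : Int := PySem.Int.floordiv ((shiftCards.length : Int) + (originKeys.length : Int)) 3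
  let min_card := PySem.List.pyGetD shiftCards 0 0
  let max_card := PySem.List.pyGetD shiftCards (-1) 0
  let min_card := if min_card > (14 - pairNum + 1) ∧ max_card ≤ 14 then 14 - pairNum + 1 else min_card
  PySem.List.sorted (altLoop pairNum.toNat min_card shiftCards makeCards) (fun x => x) false

-- ===== PRECONDITION & SPEC =====
-- A indexes shiftCards[0], an IndexError on the empty list: Pre_ excludes exactly that input
def Pre_makeKeyCardSerialTriple (originCardsButKey : List Int) (originKeys : List Int) : Prop :=
  originCardsButKey ≠ []
instance (originCardsButKey : List Int) (originKeys : List Int) : Decidable (Pre_makeKeyCardSerialTriple originCardsButKey originKeys) := by unfold Pre_makeKeyCardSerialTriple; infer_instance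

def pvWitness_makeKeyCardSerialTriple : List Int × List Int := ([96, 96, 104], [5])

def Spec_makeKeyCardSerialTriple (originCardsButKey : List Int) (originKeys : List Int) (out : List Int) : Prop := out = makeKeyCardSerialTriple_alt originCardsButKey originKeys
instance (originCardsButKey : List Int) (originKeys : List Int) (out : List Int) : Decidable (Spec_makeKeyCardSerialTriple originCardsButKey originKeys out) := by unfold Spec_makeKeyCardSerialTriple; infer_instance

-- ===== CLAIM (what is proved, stated in full; the proofs are below) =====
def Claim_equal_makeKeyCardSerialTriple : Prop := ∀ (originCardsButKey : List Int) (originKeys : List Int), Dom_makeKeyCardSerialTriple originCardsButKey originKeys → Pre_makeKeyCardSerialTriple originCardsButKey originKeys → Spec_makeKeyCardSerialTriple originCardsButKey originKeys (makeKeyCardSerialTriple originCardsButKey originKeys)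


-- ===== LEMMAS AND PROOFS =====

-- the padding both programs append for a target whose shifted-card count is c
def padSpec (t : Int) (c : Nat) : List Int :=
  List.replicate (3 - min c 3) (t <<< (3 : Nat))

-- A's hand-written counting loop is Counter(shiftCards)
lemma dict_step (d : PySem.Dict Int Int) (t : Int) :
    (if d.contains t then d.modify t 0 (· + 1) else d.insert t 1) = d.modify t 0 (· + 1) := by
  by_cases h : d.contains t
  · simp [h]
  · have hg : d.get? t = none := (PySem.Dict.get?_eq_none_iff_contains d t).mpr (by simp [h])
    simp [h, PySem.Dict.modify, PySem.Dict.getD, hg]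

lemma dict_eq_counter (l : List Int) : getCard2NumDict l = PySem.Dict.counter l := by
  unfold getCard2NumDict PySem.Dict.counter
  congr 1
  funext d t
  exact dict_step d t

-- A's per-target tempList, expressed through the multiplicity of the target
lemma tempList_eq (l : List Int) (t : Int) :
    (if (getCard2NumDict l).contains t then
        if (getCard2NumDict l).getD t 0 = 1 then [t <<< (3 : Nat), t <<< (3 : Nat)]
        else if (getCard2NumDict l).getD t 0 = 2 then [t <<< (3 : Nat)]
        else []
      else [t <<< (3 : Nat), t <<< (3 : Nat), t <<< (3 : Nat)]) = padSpec t (l.count t) := by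
  rw [dict_eq_counter, PySem.Dict.contains_counter, PySem.Dict.getD_counter]
  by_cases hm : t ∈ l
  · have hc : 0 < l.count t := List.count_pos_iff.mpr hm
    have hcont : l.contains t = true := by simpa using hm
    rw [hcont, if_pos rfl]
    by_cases h1 : l.count t = 1
    · simp [h1, padSpec, List.replicate]
    · by_cases h2 : l.count t = 2
      · simp [h2, padSpec]
      · have h3 : min (l.count t) 3 = 3 := by omega
        have e1 : ((l.count t : Int) = 1) = False := by simp; omega
        have e2 : ((l.count t : Int) = 2) = False := by simp; omega
        simp [e1, e2, padSpec, h3]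
  · have hc : l.count t = 0 := List.count_eq_zero.mpr hm
    have hcont : l.contains t = false := by simpa using hm
    simp [hc, padSpec, List.replicate, hm]

-- B's while loop returns the leading run of the target and the remaining suffix
lemma altRun_eq (t : Int) (r : List Int) :
    altRun t r = (((r.takeWhile (fun x => x == t)).length : Int), r.dropWhile (fun x => x == t)) := by
  induction r with
  | nil => simp [altRun]
  | cons x xs ih =>
    by_cases h : x = t
    · simp [altRun, h, ih]
    · simp [altRun, h]

-- on a sorted list bounded below by the target, the leading run is the whole multiplicity
lemma run_len_eq_count (a : Int) : ∀ (r : List Int), r.Pairwise (· ≤ ·) → (∀ x ∈ r, a ≤ x) →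
    (r.takeWhile (fun x => x == a)).length = r.count a := by
  intro r
  induction r with
  | nil => intro _ _; rfl
  | cons x xs ih =>
    intro hp hb
    by_cases h : x = a
    · subst h
      simp only [List.takeWhile_cons, beq_self_eq_true, if_pos, List.length_cons,
        List.count_cons_self]
      rw [ih (List.Pairwise.of_cons hp) (fun y hy => hb y (List.mem_cons_of_mem _ hy))]
    · have hax : a < x := lt_of_le_of_ne (hb x (List.mem_cons_self)) (fun he => h he.symm)
      have hnot : ∀ y ∈ x :: xs, y ≠ a := by
        intro y hy
        rcases List.mem_cons.mp hy with rfl | hy'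
        · omega
        · have := (List.pairwise_cons.mp hp).1 y hy'
          omega
      have hcz : (x :: xs).count a = 0 := List.count_eq_zero.mpr (fun hmem => hnot a hmem rfl)
      simp [h, hcz]

lemma dropWhile_lb (a : Int) (r : List Int) (hp : r.Pairwise (· ≤ ·)) (hb : ∀ x ∈ r, a ≤ x) :
    ∀ x ∈ r.dropWhile (fun x => x == a), a + 1 ≤ x := by
  cases hdw : r.dropWhile (fun x => x == a) with
  | nil => intro x hx; simp at hx
  | cons d ds =>
    have hsub : (d :: ds).Sublist r := hdw ▸ (List.dropWhile_sublist _)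
    have hpd : (d :: ds).Pairwise (· ≤ ·) := hp.sublist hsub
    have hd_ne : ¬ ((d == a) = true) := by
      have := List.head_dropWhile_not (fun x => x == a) (l := r) (by rw [hdw]; simp)
      simp only [hdw] at this
      simpa using this
    have hda : a < d := by
      have : a ≤ d := hb d (hsub.mem List.mem_cons_self)
      have : d ≠ a := by simpa using hd_ne
      omega
    intro x hx
    rcases List.mem_cons.mp hx with rfl | hx'
    · omega
    · have := (List.pairwise_cons.mp hpd).1 x hx'
      omega

lemma count_dropWhile (a s : Int) (hs : s ≠ a) (r : List Int) :
    (r.dropWhile (fun x => x == a)).count s = r.count s := by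
  conv_rhs => rw [← List.takeWhile_append_dropWhile (p := fun x => x == a) (l := r)]
  rw [List.count_append]
  have hz : (r.takeWhile (fun x => x == a)).count s = 0 := by
    apply List.count_eq_zero.mpr
    intro hmem
    have := List.mem_takeWhile_imp hmem
    simp at this
    omega
  omega

-- B's pointer loop, characterised by multiplicities of the consecutive targets
lemma altLoop_eq (cnt : Int → Nat) : ∀ (n : Nat) (a : Int) (r mc : List Int),
    r.Pairwise (· ≤ ·) → (∀ x ∈ r, a ≤ x) → (∀ s, a ≤ s → r.count s = cnt s) →
    altLoop n a r mc = mc ++ (PySem.List.pyRange a (a + n)).flatMap (fun j => padSpec j (cnt j)) := by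
  intro n
  induction n with
  | zero =>
    intro a r mc _ _ _
    simp [altLoop, PySem.List.pyRange]
  | succ n ih =>
    intro a r mc hp hb hc
    have hrun : altRun a r = ((r.count a : Int), r.dropWhile (fun x => x == a)) := by
      rw [altRun_eq, run_len_eq_count a r hp hb]
    have hrng : PySem.List.pyRange a (a + (n + 1 : Nat)) =
        a :: PySem.List.pyRange (a + 1) (a + (n + 1 : Nat)) :=
      PySem.List.pyRange_one_cons (by push_cast; omega)
    rw [hrng]
    have hpad : PySem.List.pyRepeat [a <<< (3 : Nat)] (max 0 (3 - (r.count a : Int))) =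
        padSpec a (cnt a) := by
      rw [PySem.List.pyRepeat_singleton, padSpec, ← hc a le_rfl]
      congr 1
      omega
    show altLoop (n + 1) a r mc = _
    rw [altLoop, hrun]
    simp only []
    rw [hpad]
    rw [ih (a + 1) (r.dropWhile (fun x => x == a)) _
      (hp.sublist (List.dropWhile_sublist _))
      (dropWhile_lb a r hp hb)
      (fun s hs => by rw [count_dropWhile a s (by omega) r]; exact hc s (by omega))]
    have hend : a + 1 + (n : Int) = a + ((n : Nat) + 1 : Nat) := by push_cast; ring
    rw [hend, List.append_assoc, List.flatMap_cons]

lemma pyRange_add (m : Int) : ∀ (n : Nat),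
    PySem.List.pyRange m (m + n) = (PySem.List.pyRange 0 (n : Int)).map (fun j => m + j) := by
  intro n
  induction n with
  | zero => simp [PySem.List.pyRange]
  | succ n ih =>
    have h1 : PySem.List.pyRange m (m + ((n : Nat) + 1 : Nat)) =
        PySem.List.pyRange m (m + n) ++ [m + n] := by
      have := PySem.List.pyRange_one_succ_right (a := m) (b := m + n) (by omega)
      rw [← this]
      congr 1
      omega
    have h2 : PySem.List.pyRange 0 (((n : Nat) + 1 : Nat) : Int) =
        PySem.List.pyRange 0 (n : Int) ++ [(n : Int)] := by
      have := PySem.List.pyRange_one_succ_right (a := (0:Int)) (b := (n : Int)) (by omega)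
      rw [← this]
      congr 1
    rw [h1, h2, ih, List.map_append]
    simp

-- negative index -1 names the last element, like index len-1, on a nonempty list
lemma pyGetD_neg_one (l : List Int) (d : Int) (hne : l ≠ []) :
    PySem.List.pyGetD l (-1) d = PySem.List.pyGetD l ((l.length : Int) - 1) d := by
  have hlen : 0 < l.length := List.length_pos_iff.mpr hne
  simp only [PySem.List.pyGetD, PySem.List.pyGet?, PySem.List.pyIdx?]
  have h1 : ¬ ((0:Int) ≤ -1) := by omega
  have h2 : -(l.length : Int) ≤ -1 := by omega
  have h3 : (0:Int) ≤ (l.length : Int) - 1 := by omega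
  have h4 : (l.length : Int) - 1 < (l.length : Int) := by omega
  rw [if_neg h1, if_pos h2, if_pos h3, if_pos h4]
  have h5 : l.length - ((-(-1:Int)).toNat) = ((l.length:Int)-1).toNat := by omega
  rw [h5]


-- ===== VERDICT (by name: the statement is the Claim_ definition above) =====
theorem makeKeyCardSerialTriple_spec : Claim_equal_makeKeyCardSerialTriple := by
  intro cards keys _ hpre
  unfold Spec_makeKeyCardSerialTriple makeKeyCardSerialTriple makeKeyCardSerialTriple_alt
    rightShiftCards
  simp only []
  set l := PySem.List.sorted (cards.map (fun (c : Int) => c >>> (3 : Nat))) (fun x => x) false with hl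
  have hlne : l ≠ [] := by
    rw [hl]
    simp [PySem.List.sorted_eq_nil_iff]
    exact hpre
  set pn : Int := PySem.Int.floordiv ((l.length : Int) + (keys.length : Int)) 3 with hpn
  have hpn0 : 0 ≤ pn := by
    rw [hpn, PySem.Int.floordiv_eq_ediv_of_pos (by omega)]
    exact Int.ediv_nonneg (by positivity) (by omega)
  obtain ⟨m, tl, hml⟩ := List.exists_cons_of_ne_nil hlne
  have hmin0 : PySem.List.pyGetD l 0 0 = m := by
    rw [hml]
    simp [PySem.List.pyGetD, PySem.List.pyGet?, PySem.List.pyIdx?]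
  rw [pyGetD_neg_one l 0 hlne]
  set minc : Int := if PySem.List.pyGetD l 0 0 > 14 - pn + 1 ∧
      PySem.List.pyGetD l ((l.length : Int) - 1) 0 ≤ 14 then 14 - pn + 1
    else PySem.List.pyGetD l 0 0 with hminc
  have hmincm : minc ≤ m := by
    rw [hminc, hmin0]
    split_ifs with h
    · omega
    · exact le_rfl
  have hbound : ∀ x ∈ l, minc ≤ x := by
    intro x hx
    have := PySem.List.key_head_sorted_le (cards.map (fun (c : Int) => c >>> (3 : Nat)))
      (fun x => x) (hl ▸ hml)
    have hxm : m ≤ x := this x ((PySem.List.mem_sorted _ _ _ _).mp (hl ▸ hx))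
    omega
  have hsorted : l.Pairwise (· ≤ ·) :=
    PySem.List.sorted_pairwise (cards.map (fun (c : Int) => c >>> (3 : Nat))) (fun x => x)
  -- B side
  rw [altLoop_eq (fun s => l.count s) pn.toNat minc l cards hsorted hbound (fun _ _ => rfl)]
  -- A side
  have hfun : (fun (mc : List Int) (j : Int) =>
      mc ++ (if (getCard2NumDict l).contains (minc + j) then
          if (getCard2NumDict l).getD (minc + j) 0 = 1 then
            [(minc + j) <<< (3 : Nat), (minc + j) <<< (3 : Nat)]
          else if (getCard2NumDict l).getD (minc + j) 0 = 2 then [(minc + j) <<< (3 : Nat)]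
          else []
        else [(minc + j) <<< (3 : Nat), (minc + j) <<< (3 : Nat), (minc + j) <<< (3 : Nat)])) =
      (fun mc j => mc ++ padSpec (minc + j) (l.count (minc + j))) := by
    funext mc j
    rw [tempList_eq l (minc + j)]
  rw [hfun, PySem.List.foldl_append_eq_flatMap]
  have htn : minc + (pn.toNat : Int) = minc + pn := by omega
  have hcast : ((pn.toNat : Nat) : Int) = pn := Int.toNat_of_nonneg hpn0
  rw [htn, ← hcast, pyRange_add minc pn.toNat, List.flatMap_map]
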